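-- pv_equiv track=rewrite | github.com/tac-tics/ploverize | build.py | split_stroke
-- ===== SOURCE A (Python) =====
-- MIDDLES = "AO*EU"
--
-- def split_stroke(stroke):
--     mode = 'left'
--
--     left = []
--     middle = []
--     right = []
--
--     for ch in stroke:
--         if mode == 'left':
--             if ch == '-':
--                 mode = 'right'
--             elif ch in MIDDLES:
--                 mode = 'middle'
--             else:
--                 left.append(ch)
--
--         if mode == 'middle':
--             if ch not in MIDDLES:
--                 mode = 'right'
--             else:
--                 middle.append(ch)
--
--         if mode == 'right':
--             right.append(ch)
--
--     if len(middle) == 0 and len(right) > 0: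
--         # trim leading '-'
--         right = right[1:]
--
--     return ''.join(left), ''.join(middle), ''.join(right)
-- ===== SOURCE B (Python) =====
-- MIDDLES = "AO*EU"
--
-- def split_stroke(stroke):
--     # compute the two boundaries first, then slice: no per-character mode state
--     n = len(stroke)
--     i = next((k for k, ch in enumerate(stroke) if ch in MIDDLES or ch == '-'), n)
--     left = stroke[:i]
--     if i == n:
--         return left, '', ''
--     if stroke[i] == '-':
--         return left, '', stroke[i+1:]
--     j = i + 1 + next((k for k, ch in enumerate(stroke[i+1:]) if ch not in MIDDLES), n - i - 1)
--     return left, stroke[i:j], stroke[j:]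
-- ===== Notes on version B (the rewrite author's own statement) =====
-- stated objective: simpler
-- what changed: Replaced the per-character three-mode state machine with boundary computation and slicing: find the first separator-or-vowel index, then either skip the lone separator or take the vowel run, the remainder being the right part (no trailing trim step needed).
import Mathlib
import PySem

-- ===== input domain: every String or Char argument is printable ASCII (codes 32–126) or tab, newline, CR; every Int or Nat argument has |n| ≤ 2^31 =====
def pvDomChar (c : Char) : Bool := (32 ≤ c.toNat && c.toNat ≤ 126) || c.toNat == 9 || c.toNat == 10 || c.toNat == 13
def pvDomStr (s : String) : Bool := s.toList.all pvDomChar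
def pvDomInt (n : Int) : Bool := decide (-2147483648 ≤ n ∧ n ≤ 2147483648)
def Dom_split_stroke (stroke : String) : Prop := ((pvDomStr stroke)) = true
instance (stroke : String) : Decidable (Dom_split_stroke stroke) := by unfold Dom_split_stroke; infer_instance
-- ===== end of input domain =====

-- B replaces A's per-character three-mode state machine by computing the two
-- boundary indices first and slicing (objective: simpler).

-- ===== PORT A =====
def pvMIDDLES : List Char := ['A', 'O', '*', 'E', 'U']

-- one iteration of A's for-loop body on state (mode, left, middle, right)
def pvStepA (s : String × List Char × List Char × List Char) (ch : Char) :
    String × List Char × List Char × List Char :=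
  let (mode, left, middle, right) := s
  let (mode, left) :=
    if mode = "left" then
      if ch = '-' then ("right", left)
      else if pvMIDDLES.contains ch then ("middle", left)
      else ("left", left ++ [ch])
    else (mode, left)
  let (mode, middle) :=
    if mode = "middle" then
      if ¬ pvMIDDLES.contains ch then ("right", middle)
      else ("middle", middle ++ [ch])
    else (mode, middle)
  let right := if mode = "right" then right ++ [ch] else right
  (mode, left, middle, right)

def split_stroke (stroke : String) : String × String × String :=
  let st := stroke.toList.foldl pvStepA ("left", [], [], [])
  let left := st.2.1
  let middle := st.2.2.1
  let right := st.2.2.2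
  let right := if middle.length = 0 ∧ right.length > 0 then right.drop 1 else right
  (String.ofList left, String.ofList middle, String.ofList right)

-- ===== PORT B =====
-- Source B's first `next(enumerate…)`: index of the first MIDDLES-or-'-' char, else length
def pvFirstSpecial : List Char → Nat
  | [] => 0
  | c :: cs => if pvMIDDLES.contains c ∨ c = '-' then 0 else pvFirstSpecial cs + 1

-- Source B's second `next(enumerate…)` over the suffix: length of the leading MIDDLES run
def pvVowelRun : List Char → Nat
  | [] => 0
  | c :: cs => if pvMIDDLES.contains c then pvVowelRun cs + 1 else 0

def split_stroke_alt (stroke : String) : String × String × String :=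
  let cs := stroke.toList
  let n := cs.length
  let i := pvFirstSpecial cs
  let left := String.ofList (cs.take i)
  if i = n then (left, "", "")
  else if cs.getD i ' ' = '-' then  -- stroke[i]; i < n in this branch, so getD never defaults
    (left, "", String.ofList (cs.drop (i + 1)))
  else
    let j := i + 1 + pvVowelRun (cs.drop (i + 1))
    (left, String.ofList ((cs.drop i).take (j - i)), String.ofList (cs.drop j))

-- ===== PRECONDITION & SPEC =====
def Spec_split_stroke (stroke : String) (out : String × String × String) : Prop := out = split_stroke_alt stroke
instance (stroke : String) (out : String × String × String) : Decidable (Spec_split_stroke stroke out) := by unfold Spec_split_stroke; infer_instance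

-- ===== CLAIM (what is proved, stated in full; the proofs are below) =====
def Claim_equal_split_stroke : Prop := ∀ (stroke : String), Dom_split_stroke stroke → Spec_split_stroke stroke (split_stroke stroke)

-- ===== LEMMAS AND PROOFS =====

-- proof-side recursive splitters used to characterise both programs
def pvTakeLeft : List Char → List Char × List Char
  | [] => ([], [])
  | c :: cs =>
    if ¬ pvMIDDLES.contains c ∧ c ≠ '-' then
      let (l, rest) := pvTakeLeft cs
      (c :: l, rest)
    else ([], c :: cs)

def pvTakeMid : List Char → List Char × List Char
  | [] => ([], [])
  | c :: cs =>
    if pvMIDDLES.contains c then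
      let (m, rest) := pvTakeMid cs
      (c :: m, rest)
    else ([], c :: cs)

-- once in "right" mode, A just appends every remaining char to right
lemma pvFoldRight (cs : List Char) : ∀ (l m r : List Char),
    List.foldl pvStepA ("right", l, m, r) cs = ("right", l, m, r ++ cs) := by
  induction cs with
  | nil => simp
  | cons c cs ih =>
    intro l m r
    simp only [List.foldl_cons, pvStepA]
    simpa using ih l m (r ++ [c])

-- in "middle" mode, A appends the vowel run to middle and the rest to right
lemma pvFoldMid (cs : List Char) : ∀ (l m r : List Char),
    List.foldl pvStepA ("middle", l, m, r) cs =
      (if (pvTakeMid cs).2 = [] then "middle" else "right",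
        l, m ++ (pvTakeMid cs).1, r ++ (pvTakeMid cs).2) := by
  induction cs with
  | nil => simp [pvTakeMid]
  | cons c cs ih =>
    intro l m r
    by_cases h : pvMIDDLES.contains c
    · simp only [List.foldl_cons, pvStepA, h, pvTakeMid]
      simp [ih l (m ++ [c]) r]
    · simp only [List.foldl_cons, pvStepA, h, pvTakeMid]
      simp [pvFoldRight]

-- the remainder after pvTakeLeft starts with a MIDDLES char or '-'
lemma pvTakeLeft_rest (cs : List Char) : ∀ c cs', (pvTakeLeft cs).2 = c :: cs' →
    pvMIDDLES.contains c ∨ c = '-' := by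
  induction cs with
  | nil => intro c cs' h; simp [pvTakeLeft] at h
  | cons a as ih =>
    intro c cs' h
    by_cases ha : ¬ pvMIDDLES.contains a = true ∧ a ≠ '-'
    · simp only [pvTakeLeft, if_pos ha] at h
      exact ih c cs' h
    · simp only [pvTakeLeft, if_neg ha] at h
      injection h with h1 _
      subst h1
      by_cases hm : pvMIDDLES.contains a
      · exact Or.inl hm
      · rcases not_and_or.mp ha with h2 | h2
        · exact absurd hm (by simpa using h2)
        · exact Or.inr (by simpa using h2)

-- from "left" mode, the fold result expressed via pvTakeLeft / pvTakeMid
lemma pvFoldLeft (cs : List Char) : ∀ (l : List Char), ∃ md,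
    List.foldl pvStepA ("left", l, [], []) cs =
      (md, l ++ (pvTakeLeft cs).1,
        (match (pvTakeLeft cs).2 with
          | [] => (([], []) : List Char × List Char)
          | c :: cs' => if c = '-' then ([], c :: cs') else pvTakeMid (c :: cs')).1,
        (match (pvTakeLeft cs).2 with
          | [] => (([], []) : List Char × List Char)
          | c :: cs' => if c = '-' then ([], c :: cs') else pvTakeMid (c :: cs')).2) := by
  induction cs with
  | nil => intro l; exact ⟨"left", by simp [pvTakeLeft]⟩
  | cons c cs ih =>
    intro l
    by_cases hd : c = '-'
    · subst hd
      refine ⟨"right", ?_⟩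
      simp only [List.foldl_cons, pvStepA]
      simp [pvTakeLeft, pvMIDDLES, pvFoldRight]
    · by_cases hm : pvMIDDLES.contains c
      · have hm' : c ∈ pvMIDDLES := by simpa using hm
        refine ⟨if (pvTakeMid cs).2 = [] then "middle" else "right", ?_⟩
        simp only [List.foldl_cons, pvStepA, hm, hd]
        simp [pvTakeLeft, pvTakeMid, hm', hd, pvFoldMid]
      · have hm2 : c ∉ pvMIDDLES := by simpa using hm
        obtain ⟨md, h⟩ := ih (l ++ [c])
        refine ⟨md, ?_⟩
        simp only [List.foldl_cons, pvStepA, hm, hd]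
        simpa [pvTakeLeft, hm, hm2, hd] using h

-- pvFirstSpecial marks exactly the pvTakeLeft split point
lemma pvFirst_split (cs : List Char) :
    cs.take (pvFirstSpecial cs) = (pvTakeLeft cs).1 ∧
      cs.drop (pvFirstSpecial cs) = (pvTakeLeft cs).2 := by
  induction cs with
  | nil => simp [pvFirstSpecial, pvTakeLeft]
  | cons c cs ih =>
    by_cases h : c ∈ pvMIDDLES ∨ c = '-'
    · have h' : ¬ (c ∉ pvMIDDLES ∧ ¬ c = '-') := by tauto
      simp [pvFirstSpecial, pvTakeLeft, h, h']
    · have h' : c ∉ pvMIDDLES ∧ ¬ c = '-' := by tauto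
      simp [pvFirstSpecial, pvTakeLeft, h', ih]

-- pvVowelRun marks exactly the pvTakeMid split point
lemma pvRun_split (cs : List Char) :
    pvTakeMid cs = (cs.take (pvVowelRun cs), cs.drop (pvVowelRun cs)) := by
  induction cs with
  | nil => simp [pvVowelRun, pvTakeMid]
  | cons c cs ih =>
    by_cases h : c ∈ pvMIDDLES
    · simp [pvVowelRun, pvTakeMid, h, ih]
    · simp [pvVowelRun, pvTakeMid, h]

lemma pvFirst_le (cs : List Char) : pvFirstSpecial cs ≤ cs.length := by
  induction cs with
  | nil => simp [pvFirstSpecial]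
  | cons c cs ih =>
    by_cases h : c ∈ pvMIDDLES ∨ c = '-'
    · simp [pvFirstSpecial, h]
    · have h' : ¬ (pvMIDDLES.contains c = true ∨ c = '-') := by simpa using h
      simp only [pvFirstSpecial, if_neg h', List.length_cons]
      omega

-- ===== VERDICT (by name: the statement is the Claim_ definition above) =====
theorem split_stroke_spec : Claim_equal_split_stroke := by
  intro stroke _
  unfold Spec_split_stroke split_stroke split_stroke_alt
  obtain ⟨md, h⟩ := pvFoldLeft stroke.toList []
  obtain ⟨ht, hdrp⟩ := pvFirst_split stroke.toList
  have hsl : stroke.toList.length = stroke.length := by simp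
  rcases hrest : (pvTakeLeft stroke.toList).2 with _ | ⟨c, cs'⟩
  · -- no special char: i = n, everything is left
    rw [hrest] at h hdrp
    have hn2 : pvFirstSpecial stroke.toList = stroke.length := by
      have h1 := pvFirst_le stroke.toList
      have h2 := List.drop_eq_nil_iff.mp hdrp
      omega
    have hall : (pvTakeLeft stroke.toList).1 = stroke.toList := by
      rw [← ht, hn2, ← hsl, List.take_length]
    simp only [h]
    simp [hn2, hall, List.take_of_length_le]
  · rw [hrest] at h hdrp
    have hi : stroke.toList[pvFirstSpecial stroke.toList]? = some c := by
      have h0 : (stroke.toList.drop (pvFirstSpecial stroke.toList))[0]? = some c := by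
        rw [hdrp]; rfl
      simpa [List.getElem?_drop] using h0
    have hn : pvFirstSpecial stroke.toList ≠ stroke.length := by
      intro he
      rw [he, ← hsl, List.drop_length] at hdrp
      simp at hdrp
    have hcs' : stroke.toList.drop (pvFirstSpecial stroke.toList + 1) = cs' := by
      have h1 : stroke.toList.drop (pvFirstSpecial stroke.toList + 1)
          = (stroke.toList.drop (pvFirstSpecial stroke.toList)).drop 1 := by
        rw [List.drop_drop]
      rw [h1, hdrp, List.drop_one, List.tail_cons]
    by_cases hd : c = '-'
    · subst hd
      simp only [h]
      simp [hn, hi, ht, hcs']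
    · have hm : pvMIDDLES.contains c := by
        rcases pvTakeLeft_rest stroke.toList c cs' hrest with h1 | h1
        · exact h1
        · exact absurd h1 hd
      have hm' : c ∈ pvMIDDLES := by simpa using hm
      have hmid : pvTakeMid (c :: cs') =
          (c :: cs'.take (pvVowelRun cs'), cs'.drop (pvVowelRun cs')) := by
        simp [pvTakeMid, hm', pvRun_split cs']
      have htk : (stroke.toList.drop (pvFirstSpecial stroke.toList)).take
          (pvFirstSpecial stroke.toList + 1 + pvVowelRun cs' - pvFirstSpecial stroke.toList)
          = c :: cs'.take (pvVowelRun cs') := by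
        rw [hdrp]
        have h2 : pvFirstSpecial stroke.toList + 1 + pvVowelRun cs' - pvFirstSpecial stroke.toList
            = pvVowelRun cs' + 1 := by omega
        simp [h2]
      have hdr : stroke.toList.drop (pvFirstSpecial stroke.toList + 1 + pvVowelRun cs')
          = cs'.drop (pvVowelRun cs') := by
        rw [← List.drop_drop, hcs']
      simp only [h, if_neg hd, hmid]
      simp [hn, hi, hd, ht, hcs', htk, hdr]
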